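-- pv_equiv track=rewrite | github.com/lenardflx/EiP1_Excersises | 2024-11-26 Blatt 5/HeavyMetalUmlaute.py | replace_second_vowel_independently
-- ===== SOURCE A (Python) =====
-- UMLAUTS = {"a": "ä", "o": "ö", "u": "ü"}
--
-- def replace_second_vowel_independently(text):
--     def edit_word(word):
--         c,res = 0, ""
--         for l in word:
--             if l.lower() in UMLAUTS:
--                 c += 1
--                 if c == 2:
--                     l = UMLAUTS[l.lower()].upper() if l.isupper() else UMLAUTS[l.lower()]
--             res += l
--         return res
--     return " ".join(map(edit_word, text.split()))
-- ===== SOURCE B (Python) =====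
-- UMLAUTS = {"a": "ä", "o": "ö", "u": "ü"}
--
-- def replace_second_vowel_independently(text):
--     def edit_word(word):
--         vowel_positions = [i for i, ch in enumerate(word) if ch.lower() in UMLAUTS]
--         if len(vowel_positions) < 2:
--             return word
--         i = vowel_positions[1]
--         ch = word[i]
--         uml = UMLAUTS[ch.lower()]
--         chars = list(word)
--         chars[i] = uml.upper() if ch.isupper() else uml
--         return "".join(chars)
--     return " ".join(edit_word(w) for w in text.split())
-- ===== Notes on version B (the rewrite author's own statement) =====
-- stated objective: alternative
-- what changed: edit_word no longer carries a vowel counter and rebuilds the string character by character; B first collects the list of vowel positions with enumerate and, if there is a second one, patches that single position in a list-of-chars and joins it.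
import Mathlib
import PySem

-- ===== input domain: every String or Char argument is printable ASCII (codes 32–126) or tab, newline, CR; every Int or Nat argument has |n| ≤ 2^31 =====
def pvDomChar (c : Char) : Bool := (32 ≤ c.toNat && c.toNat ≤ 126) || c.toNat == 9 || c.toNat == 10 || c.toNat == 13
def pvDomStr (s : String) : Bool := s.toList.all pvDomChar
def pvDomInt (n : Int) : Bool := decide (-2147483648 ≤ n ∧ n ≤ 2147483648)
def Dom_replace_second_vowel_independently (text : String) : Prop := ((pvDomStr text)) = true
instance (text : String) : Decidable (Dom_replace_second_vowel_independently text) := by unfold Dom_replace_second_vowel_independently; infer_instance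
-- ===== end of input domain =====

-- B rewrites edit_word as "collect the vowel indices, then patch the second one" instead of A's
-- counter-carrying accumulation pass; same cost, objective: alternative decomposition.

-- shared module-level constant UMLAUTS, ported by hand (the umlaut characters are non-ASCII;
-- exact by case analysis, since they are only applied to keys 'a'/'o'/'u'):
-- UMLAUTS[c] for lowercase key c
def umlMap (c : Char) : Char := if c = 'a' then 'ä' else if c = 'o' then 'ö' else 'ü'
-- "ä".upper() etc., hand-ported (non-ASCII), exact on the three umlaut characters
def umlUpper (c : Char) : Char := if c = 'ä' then 'Ä' else if c = 'ö' then 'Ö' else 'Ü'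
-- l.lower() in UMLAUTS
def isVowelKey (c : Char) : Bool :=
  PySem.Chars.lowerChar c = 'a' || PySem.Chars.lowerChar c = 'o' || PySem.Chars.lowerChar c = 'u'

-- ===== PORT A =====
-- the inner def edit_word of A: counter c and accumulated string res, one pass
def editWordA (w : String) : String :=
  let r := w.toList.foldl (fun (st : Int × List Char) l =>
    if isVowelKey l then
      let c := st.1 + 1
      let l' := if c = 2 then
          (if PySem.Chars.isupper l then umlUpper (umlMap (PySem.Chars.lowerChar l))
           else umlMap (PySem.Chars.lowerChar l))
        else l
      (c, st.2 ++ [l'])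
    else (st.1, st.2 ++ [l])) ((0 : Int), ([] : List Char))
  String.ofList r.2

def replace_second_vowel_independently (text : String) : String :=
  PySem.Str.join " " ((PySem.Str.split₀ text).map editWordA)

-- ===== PORT B =====
-- the inner def edit_word of B: list of vowel positions, patch the second
def editWordB (w : String) : String :=
  let cs := w.toList
  let idxs := ((PySem.List.enumerate cs 0).filter (fun p => isVowelKey p.2)).map (·.1)
  match idxs with
  | _ :: i :: _ =>
      let ch := cs.getD i.toNat ' '
      let uml := umlMap (PySem.Chars.lowerChar ch)
      String.ofList (cs.set i.toNat (if PySem.Chars.isupper ch then umlUpper uml else uml))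
  | _ => w

def replace_second_vowel_independently_alt (text : String) : String :=
  PySem.Str.join " " ((PySem.Str.split₀ text).map editWordB)

-- ===== PRECONDITION & SPEC =====
def Spec_replace_second_vowel_independently (text : String) (out : String) : Prop := out = replace_second_vowel_independently_alt text
instance (text : String) (out : String) : Decidable (Spec_replace_second_vowel_independently text out) := by unfold Spec_replace_second_vowel_independently; infer_instance

-- ===== CLAIM (what is proved, stated in full; the proofs are below) =====
def Claim_equal_replace_second_vowel_independently : Prop := ∀ (text : String), Dom_replace_second_vowel_independently text → Spec_replace_second_vowel_independently text (replace_second_vowel_independently text)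

-- ===== LEMMAS AND PROOFS =====

-- the umlaut replacement applied to a character
def pyUml (l : Char) : Char :=
  if PySem.Chars.isupper l then umlUpper (umlMap (PySem.Chars.lowerChar l))
  else umlMap (PySem.Chars.lowerChar l)

-- recursive characterisation of A's single pass, started with vowel count c
def specGo (c : Int) : List Char → List Char
  | [] => []
  | l :: ls => if isVowelKey l then (if c + 1 = 2 then pyUml l else l) :: specGo (c + 1) ls
               else l :: specGo c ls

-- the vowel-index list of B
def vIdxs (cs : List Char) : List Int :=
  ((PySem.List.enumerate cs 0).filter (fun p => isVowelKey p.2)).map (·.1)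

-- patch position i (known nonnegative) with its umlaut
def setUml (cs : List Char) (i : Int) : List Char :=
  cs.set i.toNat (pyUml (cs.getD i.toNat ' '))

theorem foldA_eq_specGo (cs : List Char) : ∀ (c : Int) (res : List Char),
    (cs.foldl (fun (st : Int × List Char) l =>
      if isVowelKey l then
        let c := st.1 + 1
        let l' := if c = 2 then
            (if PySem.Chars.isupper l then umlUpper (umlMap (PySem.Chars.lowerChar l))
             else umlMap (PySem.Chars.lowerChar l))
          else l
        (c, st.2 ++ [l'])
      else (st.1, st.2 ++ [l])) (c, res)).2 = res ++ specGo c cs := by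
  induction cs with
  | nil => intro c res; simp [specGo]
  | cons l ls ih =>
    intro c res
    simp only [List.foldl_cons, specGo]
    by_cases h : isVowelKey l = true
    · simp only [h, if_true, ih]
      by_cases h2 : c + 1 = 2 <;> simp [h2, pyUml]
    · simp only [Bool.not_eq_true] at h
      simp [h, ih]

theorem vIdxs_shift (cs : List Char) : ∀ (s : Int),
    ((PySem.List.enumerate cs s).filter (fun p => isVowelKey p.2)).map (·.1)
      = (vIdxs cs).map (· + s) := by
  induction cs with
  | nil => intro s; simp [vIdxs, PySem.List.enumerate_nil]
  | cons l ls ih =>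
    intro s
    simp only [vIdxs, PySem.List.enumerate_cons, List.filter_cons]
    by_cases h : isVowelKey l = true
    · simp only [h, if_true, List.map_cons, ih (s + 1)]
      rw [show (0 : Int) + 1 = 1 from by norm_num, ih 1, List.map_map]
      refine congrArg₂ _ (by omega) ?_
      apply List.map_congr_left; intro a _; simp; omega
    · simp only [Bool.not_eq_true] at h
      simp only [h, Bool.false_eq_true, if_false, ih (s + 1)]
      rw [show (0 : Int) + 1 = 1 from by norm_num, ih 1, List.map_map]
      apply List.map_congr_left; intro a _; simp; omega

theorem vIdxs_cons (l : Char) (ls : List Char) :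
    vIdxs (l :: ls) = (if isVowelKey l then [(0 : Int)] else []) ++ (vIdxs ls).map (· + 1) := by
  simp only [vIdxs, PySem.List.enumerate_cons, List.filter_cons]
  by_cases h : isVowelKey l = true
  · simp [h, vIdxs_shift ls 1, vIdxs]
  · simp only [Bool.not_eq_true] at h
    simp [h, vIdxs_shift ls 1, vIdxs]

theorem vIdxs_nonneg (cs : List Char) : ∀ i ∈ vIdxs cs, 0 ≤ i := by
  induction cs with
  | nil => simp [vIdxs, PySem.List.enumerate_nil]
  | cons l ls ih =>
    intro i hi
    rw [vIdxs_cons] at hi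
    rcases List.mem_append.1 hi with h | h
    · split at h <;> simp at h; omega
    · obtain ⟨j, hj, rfl⟩ := List.mem_map.1 h
      have := ih j hj; omega

theorem setUml_cons (l : Char) (ls : List Char) (i : Int) (hi : 0 ≤ i) :
    setUml (l :: ls) (i + 1) = l :: setUml ls i := by
  have : (i + 1).toNat = i.toNat + 1 := by omega
  simp [setUml, this, List.getD]

theorem specGo_frozen (cs : List Char) : ∀ (c : Int), 1 < c → specGo c cs = cs := by
  induction cs with
  | nil => intro c _; simp [specGo]
  | cons l ls ih =>
    intro c hc
    by_cases h : isVowelKey l = true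
    · simp only [specGo, h, if_true]
      rw [if_neg (by omega : ¬ c + 1 = 2), ih (c + 1) (by omega)]
    · simp only [Bool.not_eq_true] at h
      simp [specGo, h, ih c hc]

theorem specGo_one (cs : List Char) :
    specGo 1 cs = match vIdxs cs with
                  | [] => cs
                  | i :: _ => setUml cs i := by
  induction cs with
  | nil => simp [specGo, vIdxs, PySem.List.enumerate_nil]
  | cons l ls ih =>
    rw [vIdxs_cons]
    by_cases h : isVowelKey l = true
    · simp only [h, if_true]
      simp [specGo, h, specGo_frozen ls 2 (by omega), setUml, List.getD]
    · simp only [Bool.not_eq_true] at h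
      simp only [h, Bool.false_eq_true, if_false, List.nil_append]
      rw [show specGo 1 (l :: ls) = l :: specGo 1 ls by simp [specGo, h]]
      rw [ih]
      cases hv : vIdxs ls with
      | nil => simp
      | cons i rest =>
        simp only [List.map_cons]
        exact (setUml_cons l ls i (vIdxs_nonneg ls i (by simp [hv]))).symm ▸ rfl

theorem specGo_zero (cs : List Char) :
    specGo 0 cs = match vIdxs cs with
                  | _ :: i :: _ => setUml cs i
                  | _ => cs := by
  induction cs with
  | nil => simp [specGo, vIdxs, PySem.List.enumerate_nil]
  | cons l ls ih =>
    rw [vIdxs_cons]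
    by_cases h : isVowelKey l = true
    · simp only [h, if_true]
      rw [show specGo 0 (l :: ls) = l :: specGo 1 ls by simp [specGo, h]]
      rw [specGo_one]
      cases hv : vIdxs ls with
      | nil => simp
      | cons i rest =>
        simp only [List.map_cons, List.singleton_append]
        exact (setUml_cons l ls i (vIdxs_nonneg ls i (by simp [hv]))).symm ▸ rfl
    · simp only [Bool.not_eq_true] at h
      simp only [h, Bool.false_eq_true, if_false, List.nil_append]
      rw [show specGo 0 (l :: ls) = l :: specGo 0 ls by simp [specGo, h]]
      rw [ih]
      cases hv : vIdxs ls with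
      | nil => simp
      | cons i rest =>
        cases rest with
        | nil => simp
        | cons j rest' =>
          simp only [List.map_cons]
          exact (setUml_cons l ls j (vIdxs_nonneg ls j (by simp [hv]))).symm ▸ rfl

theorem editWord_eq (w : String) : editWordA w = editWordB w := by
  have hA : editWordA w = String.ofList (specGo 0 w.toList) := by
    simp [editWordA, foldA_eq_specGo]
  rw [hA, editWordB]
  simp only [specGo_zero]
  cases hv : vIdxs w.toList with
  | nil =>
    simp only [vIdxs] at hv
    simp [hv]
  | cons i rest =>
    cases rest with
    | nil =>
      simp only [vIdxs] at hv
      simp [hv]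
    | cons j rest' =>
      simp only [vIdxs] at hv
      simp [hv, setUml, pyUml]

-- ===== VERDICT (by name: the statement is the Claim_ definition above) =====
theorem replace_second_vowel_independently_spec : Claim_equal_replace_second_vowel_independently := by
  intro text _
  unfold Spec_replace_second_vowel_independently replace_second_vowel_independently replace_second_vowel_independently_alt
  rw [List.map_congr_left (fun w _ => editWord_eq w)]
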